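-- pv_equiv track=rewrite | github.com/TheEleventhAvatar/AutoDocAgent | backend/agent_loop.py | _generate_field_suggestions
-- ===== SOURCE A (Python) =====
-- from typing import Dict, Any, List, Set, Tuple
--
-- def _generate_field_suggestions(missing_fields: List[Tuple[str, int]]) -> List[str]:
--     """Generate suggestions for obtaining missing fields"""
--     suggestions = []
--
--     if not missing_fields:
--         suggestions.append("All required fields are available!")
--         return suggestions
--
--     suggestions.append(f"Missing {len(missing_fields)} critical fields. Consider:")
--
--     for field, count in missing_fields[:5]:  # Top 5
--         if field in ["pan", "aadhar", "passport_number"]: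
--             suggestions.append(f"• Upload ID document for {field}")
--         elif field in ["date_of_birth", "birth_date"]:
--             suggestions.append(f"• Look for birth certificate or ID card with {field}")
--         elif field in ["address", "street_address"]:
--             suggestions.append(f"• Check utility bills or ID documents for {field}")
--         elif field in ["salary", "income"]:
--             suggestions.append(f"• Upload salary slip or income statement for {field}")
--         else:
--             suggestions.append(f"• Upload document containing {field}")
--
--     return suggestions
-- ===== SOURCE B (Python) =====
-- _GROUPS = [
--     (("pan", "aadhar", "passport_number"), "\u2022 Upload ID document for "),
--     (("date_of_birth", "birth_date"), "\u2022 Look for birth certificate or ID card with "),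
--     (("address", "street_address"), "\u2022 Check utility bills or ID documents for "),
--     (("salary", "income"), "\u2022 Upload salary slip or income statement for "),
-- ]
-- _DEFAULT = "\u2022 Upload document containing "
--
--
-- def _line(field, groups=_GROUPS):
--     """Recursive linear search of the group table for field's template."""
--     if not groups:
--         return _DEFAULT + field
--     names, template = groups[0]
--     if field in names:
--         return template + field
--     return _line(field, groups[1:])
--
--
-- def _build(rest, slots):
--     """Recursively emit one suggestion per field while slots remain."""
--     if not rest or slots == 0:
--         return []
--     return [_line(rest[0][0])] + _build(rest[1:], slots - 1)
--
--
-- def _generate_field_suggestions(missing_fields):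
--     if not missing_fields:
--         return ["All required fields are available!"]
--     return ["Missing %d critical fields. Consider:" % len(missing_fields)] + _build(missing_fields, 5)
-- ===== Notes on version B (the rewrite author's own statement) =====
-- stated objective: alternative
-- what changed: Replaces A's imperative append-loop over a slice with an if/elif chain by structural recursion: a recursive emitter that counts down 5 slots while consuming the list, and a recursive linear search over a (field-group, template) table instead of the branch chain.
import Mathlib
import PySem

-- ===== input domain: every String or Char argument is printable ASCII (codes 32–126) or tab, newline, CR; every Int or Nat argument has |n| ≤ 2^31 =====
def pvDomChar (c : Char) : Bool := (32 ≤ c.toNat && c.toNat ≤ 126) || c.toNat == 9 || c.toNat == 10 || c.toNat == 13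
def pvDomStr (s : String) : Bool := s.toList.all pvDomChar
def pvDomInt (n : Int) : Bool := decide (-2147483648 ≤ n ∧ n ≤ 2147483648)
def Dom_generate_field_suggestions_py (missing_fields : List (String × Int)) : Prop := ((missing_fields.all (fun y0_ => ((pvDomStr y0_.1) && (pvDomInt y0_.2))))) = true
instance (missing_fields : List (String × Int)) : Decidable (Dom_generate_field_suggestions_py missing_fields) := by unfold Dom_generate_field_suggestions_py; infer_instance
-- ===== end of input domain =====

-- B replaces A's append-loop over the slice and if/elif chain with structural
-- recursion: a slot-counting emitter plus a recursive search of a group table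
-- (alternative decomposition; same cost).

-- ===== PORT A =====
def generate_field_suggestions_py (missing_fields : List (String × Int)) : List String :=
  let suggestions : List String := []
  if missing_fields = [] then
    suggestions ++ ["All required fields are available!"]
  else
    let suggestions := suggestions ++
      ["Missing " ++ PySem.Int.toStr (PySem.List.len missing_fields) ++ " critical fields. Consider:"]
    (missing_fields.take 5).foldl (fun acc fc =>
      let field := fc.1
      if ["pan", "aadhar", "passport_number"].contains field then
        acc ++ ["• Upload ID document for " ++ field]
      else if ["date_of_birth", "birth_date"].contains field then
        acc ++ ["• Look for birth certificate or ID card with " ++ field]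
      else if ["address", "street_address"].contains field then
        acc ++ ["• Check utility bills or ID documents for " ++ field]
      else if ["salary", "income"].contains field then
        acc ++ ["• Upload salary slip or income statement for " ++ field]
      else
        acc ++ ["• Upload document containing " ++ field]) suggestions

-- ===== PORT B =====
def pvGroups : List (List String × String) :=
  [ (["pan", "aadhar", "passport_number"], "• Upload ID document for ")
  , (["date_of_birth", "birth_date"], "• Look for birth certificate or ID card with ")
  , (["address", "street_address"], "• Check utility bills or ID documents for ")
  , (["salary", "income"], "• Upload salary slip or income statement for ") ]

def pvDefault : String := "• Upload document containing "

-- recursive linear search of the group table (Source B's _line)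
def pvLine (field : String) : List (List String × String) → String
  | [] => pvDefault ++ field
  | (names, template) :: rest =>
      if names.contains field then template ++ field else pvLine field rest

-- recursive emitter counting down the remaining slots (Source B's _build)
def pvBuild : List (String × Int) → Nat → List String
  | [], _ => []
  | _, 0 => []
  | fc :: rest, Nat.succ k => [pvLine fc.1 pvGroups] ++ pvBuild rest k

def generate_field_suggestions_py_alt (missing_fields : List (String × Int)) : List String :=
  if missing_fields = [] then
    ["All required fields are available!"]
  else
    ["Missing " ++ PySem.Int.toStr (PySem.List.len missing_fields) ++ " critical fields. Consider:"]
      ++ pvBuild missing_fields 5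

-- ===== PRECONDITION & SPEC =====
def Spec_generate_field_suggestions_py (missing_fields : List (String × Int)) (out : List String) : Prop := out = generate_field_suggestions_py_alt missing_fields
instance (missing_fields : List (String × Int)) (out : List String) : Decidable (Spec_generate_field_suggestions_py missing_fields out) := by unfold Spec_generate_field_suggestions_py; infer_instance

-- ===== CLAIM (what is proved, stated in full; the proofs are below) =====
def Claim_equal_generate_field_suggestions_py : Prop := ∀ (missing_fields : List (String × Int)), Dom_generate_field_suggestions_py missing_fields → Spec_generate_field_suggestions_py missing_fields (generate_field_suggestions_py missing_fields)

-- ===== LEMMAS AND PROOFS =====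

-- A's if/elif chain computes exactly B's table search on every field string.
theorem pv_branch_eq (f : String) :
    (if ["pan", "aadhar", "passport_number"].contains f then
      "• Upload ID document for " ++ f
    else if ["date_of_birth", "birth_date"].contains f then
      "• Look for birth certificate or ID card with " ++ f
    else if ["address", "street_address"].contains f then
      "• Check utility bills or ID documents for " ++ f
    else if ["salary", "income"].contains f then
      "• Upload salary slip or income statement for " ++ f
    else
      "• Upload document containing " ++ f)
    = pvLine f pvGroups := by
  simp [pvGroups, pvLine, pvDefault]

-- B's slot-counting emitter equals mapping the line function over the slice.
theorem pv_build_eq_map (xs : List (String × Int)) (k : Nat) :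
    pvBuild xs k = (xs.take k).map (fun fc => pvLine fc.1 pvGroups) := by
  induction xs generalizing k with
  | nil => cases k <;> simp [pvBuild]
  | cons fc rest ih =>
    cases k with
    | zero => simp [pvBuild]
    | succ k => simp [pvBuild, ih]

-- ===== VERDICT (by name: the statement is the Claim_ definition above) =====
theorem generate_field_suggestions_py_spec : Claim_equal_generate_field_suggestions_py := by
  intro missing_fields _
  unfold Spec_generate_field_suggestions_py generate_field_suggestions_py generate_field_suggestions_py_alt
  by_cases h : missing_fields = []
  · simp [h]
  · simp only [h, if_neg, List.nil_append, pv_build_eq_map]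
    rw [show (fun (acc : List String) (fc : String × Int) =>
        if ["pan", "aadhar", "passport_number"].contains fc.1 then
          acc ++ ["• Upload ID document for " ++ fc.1]
        else if ["date_of_birth", "birth_date"].contains fc.1 then
          acc ++ ["• Look for birth certificate or ID card with " ++ fc.1]
        else if ["address", "street_address"].contains fc.1 then
          acc ++ ["• Check utility bills or ID documents for " ++ fc.1]
        else if ["salary", "income"].contains fc.1 then
          acc ++ ["• Upload salary slip or income statement for " ++ fc.1]
        else
          acc ++ ["• Upload document containing " ++ fc.1])
      = (fun acc fc => acc ++ [pvLine fc.1 pvGroups]) from ?_]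
    · rw [PySem.List.foldl_append_singleton_eq_map]
    · funext acc fc
      rw [← pv_branch_eq fc.1]
      split_ifs <;> rfl
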